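-- pv_equiv track=rewrite | github.com/plai-group/cluster_scripts | saeid/src/submit_job.py | arglist2dicts
-- ===== SOURCE A (Python) =====
-- def arglist2dicts(arg_list):
--     args = {}
--     flags = []
--     i = 0
--     while i < len(arg_list):
--         cur_arg = arg_list[i]
--         assert cur_arg.startswith('-'), f"Argument should start with - or -- ({cur_arg})"
--         if i+1 >= len(arg_list) or arg_list[i+1].startswith('-'):
--             # It's a flag
--             flags.append(cur_arg)
--             i += 1
--         else:
--             # It's an argument which requires a value
--             args[cur_arg] = arg_list[i+1]
--             i += 2
--     return args, flags
-- ===== SOURCE B (Python) =====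
-- def arglist2dicts(arg_list):
--     args = {}
--     flags = []
--     pending = None
--     for tok in arg_list:
--         if tok.startswith('-'):
--             if pending is not None:
--                 flags.append(pending)
--             pending = tok
--         else:
--             assert pending is not None, f"Argument should start with - or -- ({tok})"
--             args[pending] = tok
--             pending = None
--     if pending is not None:
--         flags.append(pending)
--     return args, flags
-- ===== Notes on version B (the rewrite author's own statement) =====
-- stated objective: alternative
-- what changed: Replaced the while-loop with index lookahead and variable step (i+=1 / i+=2) by a single uniform forward pass over the tokens maintaining a pending_key state that is flushed to flags when the next dash token or the end of input is reached.
import Mathlib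
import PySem

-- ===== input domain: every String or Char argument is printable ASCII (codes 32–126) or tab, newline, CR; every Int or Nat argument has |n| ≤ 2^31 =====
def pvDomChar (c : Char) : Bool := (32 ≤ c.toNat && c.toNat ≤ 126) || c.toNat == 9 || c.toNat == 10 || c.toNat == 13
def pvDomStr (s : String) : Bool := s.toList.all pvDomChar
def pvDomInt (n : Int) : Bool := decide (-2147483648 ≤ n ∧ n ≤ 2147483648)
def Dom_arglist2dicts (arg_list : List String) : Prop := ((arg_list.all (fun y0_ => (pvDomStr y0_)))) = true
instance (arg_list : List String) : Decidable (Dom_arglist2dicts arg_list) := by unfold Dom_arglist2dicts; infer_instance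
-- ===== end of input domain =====

-- B replaces A's index lookahead with variable step by a uniform single pass holding a pending key (alternative decomposition, same cost).

-- ===== PORT A =====
-- while-loop of A: recursion on the index i; on the assert's failure branch
-- (a non-dash token in key position) Python raises AssertionError — outside Pre_ — and
-- the port returns the current state there.
def pvGoA (arg_list : List String) (args : PySem.Dict String String)
    (flags : List String) (i : Nat) : PySem.Dict String String × List String :=
  if h : i < arg_list.length then
    let cur_arg := arg_list[i]
    if PySem.Str.startswith cur_arg "-" then
      if arg_list.length ≤ i + 1 ∨ PySem.Str.startswith (arg_list.getD (i+1) "") "-" then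
        -- it's a flag
        pvGoA arg_list args (flags ++ [cur_arg]) (i + 1)
      else
        -- argument which requires a value
        pvGoA arg_list (args.insert cur_arg (arg_list.getD (i+1) "")) flags (i + 2)
    else
      (args, flags)  -- Python: AssertionError (excluded by Pre_)
  else
    (args, flags)
termination_by arg_list.length - i

def arglist2dicts (arg_list : List String) : (List (String × String)) × List String :=
  let r := pvGoA arg_list PySem.Dict.empty [] 0
  (r.1.items, r.2)

-- ===== PORT B =====
-- B's for-loop over the tokens with state (args, flags, pending); after the loop the
-- still-pending key is flushed to flags. On B's assert failure (value token with no
-- pending key) Python raises AssertionError — outside Pre_ — and the port returns the state.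
def pvGoB (tokens : List String) (args : PySem.Dict String String)
    (flags : List String) (pending : Option String) : PySem.Dict String String × List String :=
  match tokens with
  | [] =>
    match pending with
    | some k => (args, flags ++ [k])
    | none => (args, flags)
  | tok :: rest =>
    if PySem.Str.startswith tok "-" then
      match pending with
      | some k => pvGoB rest args (flags ++ [k]) (some tok)
      | none => pvGoB rest args flags (some tok)
    else
      match pending with
      | some k => pvGoB rest (args.insert k tok) flags none
      | none => (args, flags)  -- Python: AssertionError (excluded by Pre_)

def arglist2dicts_alt (arg_list : List String) : (List (String × String)) × List String :=
  let r := pvGoB arg_list PySem.Dict.empty [] none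
  (r.1.items, r.2)

-- ===== PRECONDITION & SPEC =====
-- Pre_ excludes exactly the inputs on which A raises AssertionError: a token that does
-- not start with '-' appearing first or right after another non-dash token.
def Pre_arglist2dicts (arg_list : List String) : Prop :=
  ∀ i, i < arg_list.length →
    PySem.Str.startswith (arg_list.getD i "") "-" = false →
    0 < i ∧ PySem.Str.startswith (arg_list.getD (i-1) "") "-" = true
instance (arg_list : List String) : Decidable (Pre_arglist2dicts arg_list) := by
  unfold Pre_arglist2dicts; infer_instance

def pvWitness_arglist2dicts : List String := ["-a", "1", "--flag", "-b", "x y"]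

def Spec_arglist2dicts (arg_list : List String) (out : (List (String × String)) × List String) : Prop := out = arglist2dicts_alt arg_list
instance (arg_list : List String) (out : (List (String × String)) × List String) : Decidable (Spec_arglist2dicts arg_list out) := by unfold Spec_arglist2dicts; infer_instance

-- ===== CLAIM (what is proved, stated in full; the proofs are below) =====
def Claim_equal_arglist2dicts : Prop := ∀ (arg_list : List String), Dom_arglist2dicts arg_list → Pre_arglist2dicts arg_list → Spec_arglist2dicts arg_list (arglist2dicts arg_list)

-- ===== LEMMAS AND PROOFS =====

-- proof-side structural version of A's loop (same computation, list-structural)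
def pvGoA' (tokens : List String) (args : PySem.Dict String String)
    (flags : List String) : PySem.Dict String String × List String :=
  match tokens with
  | [] => (args, flags)
  | [t] =>
    if PySem.Str.startswith t "-" then (args, flags ++ [t]) else (args, flags)
  | t :: u :: rest' =>
    if PySem.Str.startswith t "-" then
      if PySem.Str.startswith u "-" then
        pvGoA' (u :: rest') args (flags ++ [t])
      else
        pvGoA' rest' (args.insert t u) flags
    else
      (args, flags)
termination_by tokens.length

-- A's index recursion computes pvGoA' of the remaining suffix
theorem pvGoA_eq_goA' (l : List String) :
    ∀ (n i : Nat) (args : PySem.Dict String String) (flags : List String),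
      l.length - i ≤ n → pvGoA l args flags i = pvGoA' (l.drop i) args flags := by
  intro n
  induction n with
  | zero =>
    intro i args flags hn
    rw [pvGoA]
    have h : ¬ i < l.length := by omega
    simp only [h, dif_neg, not_false_iff]
    rw [List.drop_eq_nil_of_le (by omega), pvGoA']
  | succ n ih =>
    intro i args flags hn
    rw [pvGoA]
    by_cases h : i < l.length
    · simp only [h, dif_pos]
      have hdrop : l.drop i = l[i] :: l.drop (i+1) := List.drop_eq_getElem_cons h
      by_cases hd : PySem.Str.startswith l[i] "-"
      · have hdc : PySem.Chars.startswith l[i].toList ['-'] = true := by simpa using hd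
        simp only [hd, if_pos]
        by_cases hnext : l.length ≤ i + 1 ∨ PySem.Str.startswith (l.getD (i+1) "") "-"
        · simp only [hnext, if_pos]
          rw [ih (i+1) args (flags ++ [l[i]]) (by omega)]
          rcases hnext with hend | hdash
          · have h2 : l.drop (i+1) = [] := List.drop_eq_nil_of_le hend
            rw [hdrop, h2, pvGoA']
            simp [pvGoA', hdc]
          · have hlt : i + 1 < l.length := by
              by_contra hc
              push_neg at hc
              rw [List.getD_eq_getElem?_getD, List.getElem?_eq_none (by omega)] at hdash
              exact absurd hdash (by decide)
            have hdrop2 : l.drop (i+1) = l[i+1] :: l.drop (i+2) := List.drop_eq_getElem_cons hlt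
            have hget : l.getD (i+1) "" = l[i+1] := List.getD_eq_getElem l "" hlt
            rw [hget] at hdash
            rw [hdrop, hdrop2, pvGoA']
            simp only [hd, if_pos, hdash]
        · simp only [hnext, if_false]
          push_neg at hnext
          obtain ⟨hlt', hdash'⟩ := hnext
          have hlt : i + 1 < l.length := by omega
          rw [ih (i+2) _ _ (by omega)]
          have hdrop2 : l.drop (i+1) = l[i+1] :: l.drop (i+2) := List.drop_eq_getElem_cons hlt
          have hget : l.getD (i+1) "" = l[i+1] := List.getD_eq_getElem l "" hlt
          rw [hget] at hdash'
          rw [hdrop, hdrop2, pvGoA']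
          simp only [hd, if_pos, hdash', Bool.not_eq_true, if_neg, if_false]
          rw [hget]
      · have hdc : PySem.Chars.startswith l[i].toList ['-'] = false := by simpa using hd
        simp only [hd, if_false]
        rw [hdrop]
        cases h2 : l.drop (i+1) with
        | nil => simp [pvGoA', hdc]
        | cons v r => simp [pvGoA', hdc]
    · simp only [h, dif_neg, not_false_iff]
      rw [List.drop_eq_nil_of_le (by omega), pvGoA']

-- the consecutive-token relation Pre_ induces: a non-dash token is preceded by a dash token
def pvR (p q : String) : Prop :=
  PySem.Str.startswith q "-" = false → PySem.Str.startswith p "-" = true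

-- B's pending-key pass equals A's structural loop on well-formed suffixes
theorem pvGoB_eq_goA' (l : List String) :
    ∀ (pending : Option String) (args : PySem.Dict String String) (flags : List String),
      List.IsChain pvR ((pending.toList) ++ l) →
      (∀ k, pending = some k → PySem.Str.startswith k "-" = true) →
      (pending = none → ∀ h : l ≠ [], PySem.Str.startswith (l.head h) "-" = true) →
      pvGoB l args flags pending = pvGoA' ((pending.toList) ++ l) args flags := by
  induction l with
  | nil =>
    intro pending args flags _ hpd _
    cases pending with
    | none => simp [pvGoB, pvGoA']
    | some k =>
      simp only [Option.toList, List.cons_append, List.nil_append]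
      rw [pvGoB, pvGoA']
      have hkc : PySem.Chars.startswith k.toList ['-'] = true := by simpa using hpd k rfl
      simp [hkc]
  | cons u rest ih =>
    intro pending args flags hchain hpd hhead
    cases pending with
    | none =>
      have hu : PySem.Str.startswith u "-" = true := hhead rfl (by simp)
      rw [pvGoB]
      simp only [hu, if_pos]
      simp only [Option.toList, List.nil_append] at hchain ⊢
      exact ih (some u) args flags hchain (by intro k hk; cases hk; exact hu) (by intro h; cases h)
    | some k =>
      have hk : PySem.Str.startswith k "-" = true := hpd k rfl
      simp only [Option.toList, List.cons_append, List.nil_append] at hchain ⊢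
      rw [pvGoB, pvGoA']
      simp only [hk, if_pos]
      by_cases hu : PySem.Str.startswith u "-" = true
      · simp only [hu, if_pos]
        have := ih (some u) args (flags ++ [k]) (by exact hchain.tail)
          (by intro k' hk'; cases hk'; exact hu) (by intro h; cases h)
        simpa using this
      · simp only [hu, if_false]
        simp only [Bool.not_eq_true] at hu
        have hchain' : List.IsChain pvR (u :: rest) := hchain.tail
        have hhead' : ∀ h : rest ≠ [], PySem.Str.startswith (rest.head h) "-" = true := by
          intro h
          cases rest with
          | nil => exact absurd rfl h
          | cons v r =>
            by_contra hc
            simp only [List.head_cons, Bool.not_eq_true] at hc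
            have := hchain'.rel_head hc
            rw [this] at hu; cases hu
        have := ih none (args.insert k u) flags (by simpa using hchain'.tail)
          (by intro k' hk'; cases hk') (by intro _; exact hhead')
        simpa using this

-- Pre_ gives the chain and head conditions
theorem pre_chain (l : List String) (hp : Pre_arglist2dicts l) : List.IsChain pvR l := by
  rw [List.isChain_iff_getElem]
  intro i hi hq
  have hi1 : i + 1 < l.length := hi
  have := hp (i+1) hi1 (by rw [List.getD_eq_getElem l "" hi1]; exact hq)
  obtain ⟨-, hdash⟩ := this
  rw [Nat.add_sub_cancel, List.getD_eq_getElem l "" (by omega)] at hdash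
  exact hdash

theorem pre_head (l : List String) (hp : Pre_arglist2dicts l) :
    ∀ h : l ≠ [], PySem.Str.startswith (l.head h) "-" = true := by
  intro h
  cases l with
  | nil => exact absurd rfl h
  | cons t rest =>
    by_contra hc
    simp only [List.head_cons, Bool.not_eq_true] at hc
    have := hp 0 (by simp) (by simpa using hc)
    omega

-- ===== VERDICT (by name: the statement is the Claim_ definition above) =====
theorem arglist2dicts_spec : Claim_equal_arglist2dicts := by
  intro l _ hp
  unfold Spec_arglist2dicts arglist2dicts arglist2dicts_alt
  rw [pvGoA_eq_goA' l l.length 0 _ _ (by omega)]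
  rw [pvGoB_eq_goA' l none PySem.Dict.empty []
    (by simpa using pre_chain l hp)
    (by intro k hk; cases hk)
    (by intro _; exact pre_head l hp)]
  simp
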